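-- pv_equiv track=rewrite | github.com/epilectrik/voynich | phases/LINE_CONTROL_BLOCK_GRAMMAR/scripts/09_positional_bigram_grammar.py | get_zone_bigrams
-- ===== SOURCE A (Python) =====
-- ZONE_NAMES = ["INITIAL_TRANSITION", "EARLY_MEDIAL", "CORE", "LATE_TRANSITION"]
--
-- def get_zone_bigrams(cls_seq):
--     """Return zone-labeled bigrams for a class sequence."""
--     n = len(cls_seq)
--     zones = {z: [] for z in ZONE_NAMES}
--     for i in range(n - 1):
--         a, b = cls_seq[i], cls_seq[i + 1]
--         if a < 0 or b < 0:
--             continue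
--         if i == 0:
--             zone = "INITIAL_TRANSITION"
--         elif i in (1, 2):
--             zone = "EARLY_MEDIAL"
--         elif i >= n - 3:
--             zone = "LATE_TRANSITION"
--         else:
--             zone = "CORE"
--         zones[zone].append((a, b))
--     return zones
-- ===== SOURCE B (Python) =====
-- ZONE_NAMES = ["INITIAL_TRANSITION", "EARLY_MEDIAL", "CORE", "LATE_TRANSITION"]
--
-- def get_zone_bigrams(cls_seq):
--     """Return zone-labeled bigrams for a class sequence."""
--     n = len(cls_seq)
--     ranges = {
--         "INITIAL_TRANSITION": range(0, min(1, n - 1)),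
--         "EARLY_MEDIAL": range(1, min(3, n - 1)),
--         "CORE": range(3, max(3, n - 3)),
--         "LATE_TRANSITION": range(max(3, n - 3), n - 1),
--     }
--     return {z: [(cls_seq[i], cls_seq[i + 1]) for i in ranges[z]
--                 if cls_seq[i] >= 0 and cls_seq[i + 1] >= 0]
--             for z in ZONE_NAMES}
-- ===== Notes on version B (the rewrite author's own statement) =====
-- stated objective: alternative
-- what changed: Instead of one loop over all bigram indices that classifies each index with an if/elif chain, B derives each zone's contiguous index range from n in closed form and collects each zone's bigrams by iterating only that range.
import Mathlib
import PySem

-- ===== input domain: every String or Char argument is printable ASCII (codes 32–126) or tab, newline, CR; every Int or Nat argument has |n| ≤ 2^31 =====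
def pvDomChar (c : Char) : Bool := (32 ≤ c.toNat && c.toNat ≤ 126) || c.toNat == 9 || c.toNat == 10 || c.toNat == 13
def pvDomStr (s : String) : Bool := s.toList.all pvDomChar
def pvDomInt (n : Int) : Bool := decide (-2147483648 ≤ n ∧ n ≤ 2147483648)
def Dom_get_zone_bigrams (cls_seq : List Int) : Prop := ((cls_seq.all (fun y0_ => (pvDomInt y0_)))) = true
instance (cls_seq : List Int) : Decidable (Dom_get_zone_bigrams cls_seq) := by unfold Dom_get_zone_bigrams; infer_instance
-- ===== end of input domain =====

-- B replaces A's single loop with an if/elif zone classification per index by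
-- closed-form per-zone index ranges derived from n, collecting each zone from its own range.

-- ===== PORT A =====
def ZONE_NAMES : List String := ["INITIAL_TRANSITION", "EARLY_MEDIAL", "CORE", "LATE_TRANSITION"]

def get_zone_bigrams (cls_seq : List Int) : List (String × List (Int × Int)) :=
  let n : Int := cls_seq.length
  let zones : PySem.Dict String (List (Int × Int)) :=
    ZONE_NAMES.foldl (fun d z => d.insert z []) PySem.Dict.empty
  let zones := (PySem.List.pyRange 0 (n - 1) 1).foldl (fun d i =>
    match PySem.List.pyGet? cls_seq i, PySem.List.pyGet? cls_seq (i + 1) with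
    | some a, some b =>
      if a < 0 ∨ b < 0 then d
      else
        let zone : String :=
          if i = 0 then "INITIAL_TRANSITION"
          else if i = 1 ∨ i = 2 then "EARLY_MEDIAL"
          else if i ≥ n - 3 then "LATE_TRANSITION"
          else "CORE"
        d.modify zone [] (fun l => l ++ [(a, b)])
    | _, _ => d) zones
  zones.items

-- ===== PORT B =====
-- the per-zone comprehension '[(cls_seq[i], cls_seq[i+1]) for i in r if … >= 0 and … >= 0]'
def bigramsInRange (cls_seq : List Int) (r : List Int) : List (Int × Int) :=
  r.filterMap (fun i =>
    match PySem.List.pyGet? cls_seq i with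
    | none => none
    | some a =>
      match PySem.List.pyGet? cls_seq (i + 1) with
      | none => none
      | some b => if a ≥ 0 ∧ b ≥ 0 then some (a, b) else none)

def zoneRanges (n : Int) : List (String × List Int) :=
  [("INITIAL_TRANSITION", PySem.List.pyRange 0 (min 1 (n - 1)) 1),
   ("EARLY_MEDIAL", PySem.List.pyRange 1 (min 3 (n - 1)) 1),
   ("CORE", PySem.List.pyRange 3 (max 3 (n - 3)) 1),
   ("LATE_TRANSITION", PySem.List.pyRange (max 3 (n - 3)) (n - 1) 1)]

def get_zone_bigrams_alt (cls_seq : List Int) : List (String × List (Int × Int)) :=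
  let n : Int := cls_seq.length
  (zoneRanges n).map (fun zr => (zr.1, bigramsInRange cls_seq zr.2))

-- ===== PRECONDITION & SPEC =====
def Spec_get_zone_bigrams (cls_seq : List Int) (out : List (String × List (Int × Int))) : Prop := out = get_zone_bigrams_alt cls_seq
instance (cls_seq : List Int) (out : List (String × List (Int × Int))) : Decidable (Spec_get_zone_bigrams cls_seq out) := by unfold Spec_get_zone_bigrams; infer_instance

-- ===== CLAIM (what is proved, stated in full; the proofs are below) =====
def Claim_equal_get_zone_bigrams : Prop := ∀ (cls_seq : List Int), Dom_get_zone_bigrams cls_seq → Spec_get_zone_bigrams cls_seq (get_zone_bigrams cls_seq)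

-- ===== LEMMAS AND PROOFS =====

-- zone chosen by A's if/elif chain at index i (sequence length n)
def zoneName (n i : Int) : String :=
  if i = 0 then "INITIAL_TRANSITION"
  else if i = 1 ∨ i = 2 then "EARLY_MEDIAL"
  else if i ≥ n - 3 then "LATE_TRANSITION"
  else "CORE"

-- A's loop body as an optional (zone, pair) emission
def gA (cls_seq : List Int) (n i : Int) : Option (String × (Int × Int)) :=
  match PySem.List.pyGet? cls_seq i, PySem.List.pyGet? cls_seq (i + 1) with
  | some a, some b => if a < 0 ∨ b < 0 then none else some (zoneName n i, (a, b))
  | _, _ => none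

-- B's comprehension body
def gB (cls_seq : List Int) (i : Int) : Option (Int × Int) :=
  match PySem.List.pyGet? cls_seq i with
  | none => none
  | some a =>
    match PySem.List.pyGet? cls_seq (i + 1) with
    | none => none
    | some b => if a ≥ 0 ∧ b ≥ 0 then some (a, b) else none

theorem bigramsInRange_eq (cls_seq : List Int) (r : List Int) :
    bigramsInRange cls_seq r = r.filterMap (gB cls_seq) := rfl

theorem gA_eq_map_gB (cls_seq : List Int) (n i : Int) :
    gA cls_seq n i = (gB cls_seq i).map (fun pr => (zoneName n i, pr)) := by
  unfold gA gB
  rcases PySem.List.pyGet? cls_seq i with _ | a <;>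
    rcases PySem.List.pyGet? cls_seq (i + 1) with _ | b
  · rfl
  · rfl
  · rfl
  · dsimp only
    by_cases hab : a < 0 ∨ b < 0
    · rw [if_pos hab, if_neg (by omega)]
      rfl
    · rw [if_neg hab, if_pos (by omega)]
      rfl

-- a fold whose step is "emit-or-skip" is the fold over the emitted stream
theorem foldl_filterMap_step {alpha beta gamma : Type} (f : gamma -> alpha -> gamma) (g : alpha -> Option beta)
    (step : gamma -> beta -> gamma) (h : forall d i, f d i = match g i with | some p => step d p | none => d) :
    forall (l : List alpha) (d : gamma), l.foldl f d = (l.filterMap g).foldl step d := by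
  intro l
  induction l with
  | nil => intro d; rfl
  | cons i t ih =>
    intro d
    rw [List.foldl_cons, List.filterMap_cons, h d i]
    rcases g i with _ | p
    · exact ih d
    · rw [List.foldl_cons]
      exact ih _

-- zoneName always lands in ZONE_NAMES
theorem zoneName_mem (n i : Int) : zoneName n i ∈ ZONE_NAMES := by
  unfold zoneName ZONE_NAMES
  split_ifs <;> simp

-- a chunk whose indices all classify to z emits z-labelled pairs
theorem filterMap_gA_const_zone (cls_seq : List Int) (n : Int) (z : String)
    (R : List Int) (hz : ∀ i ∈ R, zoneName n i = z) :
    R.filterMap (gA cls_seq n)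
      = (R.filterMap (gB cls_seq)).map (fun pr => (z, pr)) := by
  induction R with
  | nil => rfl
  | cons i t ih =>
    have hi : zoneName n i = z := hz i (by simp)
    have ht : ∀ j ∈ t, zoneName n j = z := fun j hj => hz j (by simp [hj])
    simp only [List.filterMap_cons]
    rw [gA_eq_map_gB, hi]
    rcases gB cls_seq i with _ | pr <;> simp [ih ht]

-- the filter of a labelled chunk keeps all of it (own label) …
theorem filter_map_label_self (z : String) (P : List (Int × Int)) :
    (P.map (fun pr => (z, pr))).filter (fun p => p.1 == z) = P.map (fun pr => (z, pr)) := by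
  rw [List.filter_map]
  simp [Function.comp_def]

-- … or none of it (foreign label)
theorem filter_map_label_ne (z z' : String) (hne : z ≠ z') (P : List (Int × Int)) :
    (P.map (fun pr => (z, pr))).filter (fun p => p.1 == z') = [] := by
  rw [List.filter_map]
  simp [Function.comp_def, hne]

theorem pyRange_one_nil (a b : Int) (h : b ≤ a) : PySem.List.pyRange a b 1 = [] := by
  rw [PySem.List.pyRange_one]
  have : (b - a).toNat = 0 := by omega
  simp [this]

-- range split: the bigram indices 0..n-2 are exactly the four zone ranges, in order
theorem range_split (n : Int) :
    PySem.List.pyRange 0 (n - 1) 1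
      = PySem.List.pyRange 0 (min 1 (n - 1)) 1
        ++ PySem.List.pyRange 1 (min 3 (n - 1)) 1
        ++ PySem.List.pyRange 3 (max 3 (n - 3)) 1
        ++ PySem.List.pyRange (max 3 (n - 3)) (n - 1) 1 := by
  by_cases h1 : n ≤ 1
  · rw [pyRange_one_nil 0 (n-1) (by omega), pyRange_one_nil 0 (min 1 (n-1)) (by omega),
      pyRange_one_nil 1 (min 3 (n-1)) (by omega), pyRange_one_nil 3 (max 3 (n-3)) (by omega),
      pyRange_one_nil (max 3 (n-3)) (n-1) (by omega)]
    rfl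
  · by_cases h4 : n ≤ 4
    · have hmin1 : min 1 (n - 1) = 1 := by omega
      have hmin3 : min 3 (n - 1) = n - 1 := by omega
      have hmax : max 3 (n - 3) = 3 := by omega
      rw [hmin1, hmin3, hmax, pyRange_one_nil 3 3 (by omega), pyRange_one_nil 3 (n-1) (by omega),
        PySem.List.pyRange_one_append 0 1 (n-1) (by omega) (by omega)]
      simp
    · have hmin1 : min 1 (n - 1) = 1 := by omega
      have hmin3 : min 3 (n - 1) = 3 := by omega
      have hm3 : (3 : Int) ≤ max 3 (n - 3) := le_max_left _ _
      have hmn : max 3 (n - 3) ≤ n - 1 := by omega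
      rw [hmin1, hmin3,
        PySem.List.pyRange_one_append 0 1 (n-1) (by omega) (by omega),
        PySem.List.pyRange_one_append 1 3 (n-1) (by omega) (by omega),
        PySem.List.pyRange_one_append 3 (max 3 (n-3)) (n-1) hm3 hmn]
      simp

-- zone classification on each of the four ranges
theorem zone_R0 (n i : Int) (h : i ∈ PySem.List.pyRange 0 (min 1 (n - 1)) 1) :
    zoneName n i = "INITIAL_TRANSITION" := by
  rw [PySem.List.mem_pyRange_one] at h
  have : i = 0 := by omega
  simp [zoneName, this]

theorem zone_R1 (n i : Int) (h : i ∈ PySem.List.pyRange 1 (min 3 (n - 1)) 1) :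
    zoneName n i = "EARLY_MEDIAL" := by
  rw [PySem.List.mem_pyRange_one] at h
  have h12 : i = 1 ∨ i = 2 := by omega
  have h0 : i ≠ 0 := by omega
  simp [zoneName, h0, h12]

theorem zone_R2 (n i : Int) (h : i ∈ PySem.List.pyRange 3 (max 3 (n - 3)) 1) :
    zoneName n i = "CORE" := by
  rw [PySem.List.mem_pyRange_one] at h
  unfold zoneName
  rw [if_neg (by omega), if_neg (by omega), if_neg (by omega)]

theorem zone_R3 (n i : Int) (h : i ∈ PySem.List.pyRange (max 3 (n - 3)) (n - 1) 1) :
    zoneName n i = "LATE_TRANSITION" := by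
  rw [PySem.List.mem_pyRange_one] at h
  unfold zoneName
  rw [if_neg (by omega), if_neg (by omega), if_pos (by omega)]

-- ===== VERDICT (by name: the statement is the Claim_ definition above) =====
theorem get_zone_bigrams_spec : Claim_equal_get_zone_bigrams := by
  intro cls_seq _
  unfold Spec_get_zone_bigrams
  simp only [get_zone_bigrams]
  have hinit : ZONE_NAMES.foldl (fun d z => d.insert z []) (PySem.Dict.empty : PySem.Dict String (List (Int × Int)))
      = PySem.Dict.mk [("INITIAL_TRANSITION", []), ("EARLY_MEDIAL", []), ("CORE", []), ("LATE_TRANSITION", [])] := by decide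
  rw [hinit, foldl_filterMap_step _ (gA cls_seq (cls_seq.length : Int))
      (fun d p => d.modify p.1 [] (fun l => l ++ [p.2]))
      (fun d i => by
        unfold gA zoneName
        rcases PySem.List.pyGet? cls_seq i with _ | a <;>
          rcases PySem.List.pyGet? cls_seq (i + 1) with _ | b
        · rfl
        · rfl
        · rfl
        · dsimp only
          by_cases hab : a < 0 ∨ b < 0
          · rw [if_pos hab, if_pos hab]
          · rw [if_neg hab, if_neg hab]
            try rfl)]
  set n : Int := (cls_seq.length : Int) with hn
  set P : List (String × (Int × Int)) := (PySem.List.pyRange 0 (n - 1) 1).filterMap (gA cls_seq n) with hP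
  set D := P.foldl (fun d p => d.modify p.1 [] (fun l => l ++ [p.2]))
    (PySem.Dict.mk [("INITIAL_TRANSITION", []), ("EARLY_MEDIAL", []), ("CORE", []), ("LATE_TRANSITION", [])]) with hD
  -- keys stay the four zone names
  have hkeys : D.keys = ["INITIAL_TRANSITION", "EARLY_MEDIAL", "CORE", "LATE_TRANSITION"] := by
    rw [hD, PySem.Dict.keys_foldl_modify_key, PySem.Set.update_eq_append_filter]
    have hfil : (PySem.Set.ofList (P.map Prod.fst)).filter
        (fun y => !(PySem.Set.contains (PySem.Dict.mk [("INITIAL_TRANSITION", ([] : List (Int × Int))), ("EARLY_MEDIAL", []), ("CORE", []), ("LATE_TRANSITION", [])]).keys y)) = [] := by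
      rw [List.filter_eq_nil_iff]
      intro y hy
      rw [PySem.Set.mem_ofList] at hy
      obtain ⟨p, hp, hpy⟩ := List.mem_map.mp hy
      obtain ⟨i, _, hgi⟩ := List.mem_filterMap.mp (hP ▸ hp)
      have hp1 : p.1 = zoneName n i := by
        rw [gA_eq_map_gB, Option.map_eq_some_iff] at hgi
        obtain ⟨pr, _, hpr⟩ := hgi
        rw [← hpr]
      have hymem : y ∈ ZONE_NAMES := by
        rw [← hpy, hp1]; exact zoneName_mem n i
      simp only [Bool.not_eq_true', Bool.not_eq_false]
      rw [PySem.Set.contains_iff]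
      simpa [ZONE_NAMES, PySem.Dict.keys] using hymem
    rw [hfil]
    rfl
  have hnodup : D.keys.Nodup := by rw [hkeys]; decide
  -- items from keys + lookups
  rw [PySem.Dict.items_eq_map_keys D hnodup [], hkeys]
  -- each lookup is the initial [] plus that zone's filtered pairs
  have hget : ∀ z : String, D.getD z []
      = (PySem.Dict.mk [("INITIAL_TRANSITION", ([] : List (Int × Int))), ("EARLY_MEDIAL", []), ("CORE", []), ("LATE_TRANSITION", [])]).getD z []
        ++ (P.filter (fun p => p.1 == z)).map Prod.snd := by
    intro z
    rw [hD, PySem.Dict.getD_foldl_modify_append]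
  -- decompose P along the four zone ranges
  have hPsplit : P = ((PySem.List.pyRange 0 (min 1 (n - 1)) 1).filterMap (gB cls_seq)).map (fun pr => ("INITIAL_TRANSITION", pr))
      ++ ((PySem.List.pyRange 1 (min 3 (n - 1)) 1).filterMap (gB cls_seq)).map (fun pr => ("EARLY_MEDIAL", pr))
      ++ ((PySem.List.pyRange 3 (max 3 (n - 3)) 1).filterMap (gB cls_seq)).map (fun pr => ("CORE", pr))
      ++ ((PySem.List.pyRange (max 3 (n - 3)) (n - 1) 1).filterMap (gB cls_seq)).map (fun pr => ("LATE_TRANSITION", pr)) := by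
    rw [hP, range_split n, List.filterMap_append, List.filterMap_append, List.filterMap_append,
      filterMap_gA_const_zone cls_seq n _ _ (zone_R0 n),
      filterMap_gA_const_zone cls_seq n _ _ (zone_R1 n),
      filterMap_gA_const_zone cls_seq n _ _ (zone_R2 n),
      filterMap_gA_const_zone cls_seq n _ _ (zone_R3 n)]
  have h0 : (P.filter (fun p => p.1 == "INITIAL_TRANSITION")).map Prod.snd
      = bigramsInRange cls_seq (PySem.List.pyRange 0 (min 1 (n - 1)) 1) := by
    rw [hPsplit]
    simp only [List.filter_append, List.map_append]
    rw [filter_map_label_self, filter_map_label_ne _ _ (by decide),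
      filter_map_label_ne _ _ (by decide), filter_map_label_ne _ _ (by decide)]
    simp [bigramsInRange_eq]
  have h1 : (P.filter (fun p => p.1 == "EARLY_MEDIAL")).map Prod.snd
      = bigramsInRange cls_seq (PySem.List.pyRange 1 (min 3 (n - 1)) 1) := by
    rw [hPsplit]
    simp only [List.filter_append, List.map_append]
    rw [filter_map_label_self, filter_map_label_ne _ _ (by decide),
      filter_map_label_ne _ _ (by decide), filter_map_label_ne _ _ (by decide)]
    simp [bigramsInRange_eq]
  have h2 : (P.filter (fun p => p.1 == "CORE")).map Prod.snd
      = bigramsInRange cls_seq (PySem.List.pyRange 3 (max 3 (n - 3)) 1) := by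
    rw [hPsplit]
    simp only [List.filter_append, List.map_append]
    rw [filter_map_label_self, filter_map_label_ne _ _ (by decide),
      filter_map_label_ne _ _ (by decide), filter_map_label_ne _ _ (by decide)]
    simp [bigramsInRange_eq]
  have h3 : (P.filter (fun p => p.1 == "LATE_TRANSITION")).map Prod.snd
      = bigramsInRange cls_seq (PySem.List.pyRange (max 3 (n - 3)) (n - 1) 1) := by
    rw [hPsplit]
    simp only [List.filter_append, List.map_append]
    rw [filter_map_label_self, filter_map_label_ne _ _ (by decide),
      filter_map_label_ne _ _ (by decide), filter_map_label_ne _ _ (by decide)]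
    simp [bigramsInRange_eq]
  simp only [List.map, hget, h0, h1, h2, h3]
  rfl
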